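-- pv_equiv track=rewrite | github.com/srikala-g/AI-Portfolio | 9_optimization/scheduling/schedule0.py | backtrack
-- ===== SOURCE A (Python) =====
-- VARIABLES = ["A", "B", "C", "D", "E", "F", "G"]
--
-- CONSTRAINTS = [
--     ("A", "B"),
--     ("A", "C"),
--     ("B", "C"),
--     ("B", "D"),
--     ("B", "E"),
--     ("C", "E"),
--     ("C", "F"),
--     ("D", "E"),
--     ("E", "F"),
--     ("E", "G"),
--     ("F", "G")
-- ]
--
-- def backtrack(assignment):
--     """Runs backtracking search to find an assignment."""
--
--     # Check if assignment is complete
--     if len(assignment) == len(VARIABLES):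
--         return assignment
--
--     # Try a new variable
--     var = select_unassigned_variable(assignment)
--     for value in ["Monday", "Tuesday", "Wednesday"]:
--         new_assignment = assignment.copy()
--         new_assignment[var] = value
--         if consistent(new_assignment):
--             result = backtrack(new_assignment)
--             if result is not None:
--                 return result
--     return None
--
-- def select_unassigned_variable(assignment):
--     """Chooses a variable not yet assigned, in order."""
--     for variable in VARIABLES:
--         if variable not in assignment:
--             return variable
--     return None
--
-- def consistent(assignment):
--     """Checks to see if an assignment is consistent."""
--     for (x, y) in CONSTRAINTS:
--
--         # Only consider arcs where both are assigned
--         if x not in assignment or y not in assignment: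
--             continue
--
--         # If both have same value, then not consistent
--         if assignment[x] == assignment[y]:
--             return False
--
--     # If nothing inconsistent, then assignment is consistent
--     return True
-- ===== SOURCE B (Python) =====
-- VARIABLES = ["A", "B", "C", "D", "E", "F", "G"]
--
-- CONSTRAINTS = [
--     ("A", "B"),
--     ("A", "C"),
--     ("B", "C"),
--     ("B", "D"),
--     ("B", "E"),
--     ("C", "E"),
--     ("C", "F"),
--     ("D", "E"),
--     ("E", "F"),
--     ("E", "G"),
--     ("F", "G")
-- ]
--
-- def backtrack(assignment):
--     """Iterative depth-first search with an explicit stack of partial assignments."""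
--     stack = [dict(assignment)]
--     while stack:
--         current = stack.pop()
--         if len(current) == len(VARIABLES):
--             return current
--         var = select_unassigned_variable(current)
--         # push in reverse so Monday is explored first (LIFO stack)
--         for value in reversed(["Monday", "Tuesday", "Wednesday"]):
--             new_assignment = dict(current)
--             new_assignment[var] = value
--             if consistent(new_assignment):
--                 stack.append(new_assignment)
--     return None
--
-- def select_unassigned_variable(assignment):
--     """Chooses a variable not yet assigned, in order."""
--     for variable in VARIABLES:
--         if variable not in assignment:
--             return variable
--     return None
--
-- def consistent(assignment):
--     """Checks to see if an assignment is consistent."""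
--     for (x, y) in CONSTRAINTS:
--         if x not in assignment or y not in assignment:
--             continue
--         if assignment[x] == assignment[y]:
--             return False
--     return True
-- ===== Notes on version B (the rewrite author's own statement) =====
-- stated objective: alternative
-- what changed: The recursive backtracking search is replaced by an iterative loop over an explicit LIFO stack of partial assignments, pushing the consistent one-variable extensions in reverse value order so the first solution found is identical.
import Mathlib
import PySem

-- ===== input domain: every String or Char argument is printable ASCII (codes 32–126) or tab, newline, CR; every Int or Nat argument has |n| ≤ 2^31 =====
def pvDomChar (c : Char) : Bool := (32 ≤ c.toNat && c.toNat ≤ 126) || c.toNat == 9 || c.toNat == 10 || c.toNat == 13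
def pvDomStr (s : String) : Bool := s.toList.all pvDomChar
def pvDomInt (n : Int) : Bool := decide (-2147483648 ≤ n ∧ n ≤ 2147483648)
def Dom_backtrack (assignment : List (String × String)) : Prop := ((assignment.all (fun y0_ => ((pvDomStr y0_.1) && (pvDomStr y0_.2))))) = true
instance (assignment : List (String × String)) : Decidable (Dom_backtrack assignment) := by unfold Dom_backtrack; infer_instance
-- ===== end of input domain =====

-- B replaces the recursive backtracking search by an iterative loop over an explicit LIFO
-- stack of partial assignments (pushed in reverse value order), same first solution returned.

-- Shared module-level constants and helpers (identical in Source A and Source B).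
def pvVars : List String := ["A", "B", "C", "D", "E", "F", "G"]

def pvConstraints : List (String × String) :=
  [("A", "B"), ("A", "C"), ("B", "C"), ("B", "D"), ("B", "E"), ("C", "E"),
   ("C", "F"), ("D", "E"), ("E", "F"), ("E", "G"), ("F", "G")]

def pvValues : List String := ["Monday", "Tuesday", "Wednesday"]

-- select_unassigned_variable: first variable of VARIABLES not in the assignment.
def pvSelectGo (a : PySem.Dict String String) : List String → Option String
  | [] => none
  | v :: rest => if !(a.contains v) then some v else pvSelectGo a rest

def pvSelect (a : PySem.Dict String String) : Option String := pvSelectGo a pvVars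

-- consistent: loop over CONSTRAINTS; both keys present (getD is exact there) and equal values → False.
def pvConsistentGo (a : PySem.Dict String String) : List (String × String) → Bool
  | [] => true
  | (x, y) :: rest =>
    if !(a.contains x) || !(a.contains y) then pvConsistentGo a rest
    else if a.getD x "" == a.getD y "" then false
    else pvConsistentGo a rest

def pvConsistent (a : PySem.Dict String String) : Bool := pvConsistentGo a pvConstraints

-- ===== PORT A =====
-- the 'for value in [...]' loop of A: try each value, recurse (rec = the enclosing backtrack).
def pvTryA (rec : PySem.Dict String String → Option (PySem.Dict String String))
    (a : PySem.Dict String String) (v : String) : List String → Option (PySem.Dict String String)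
  | [] => none
  | val :: rest =>
    let na := a.insert v val
    if pvConsistent na then
      match rec na with
      | some r => some r
      | none => pvTryA rec a v rest
    else pvTryA rec a v rest

def pvGoA : Nat → PySem.Dict String String → Option (PySem.Dict String String)
  | 0, _ => none        -- fuel guard only: each level assigns one more of the 7 variables
  | f + 1, a =>
    if PySem.Dict.size a = pvVars.length then some a
    else
      match pvSelect a with
      | none => none    -- Python would assign to key None here; unreachable on Pre_ inputs
      | some v => pvTryA (pvGoA f) a v pvValues

def backtrack (assignment : List (String × String)) : Option (List (String × String)) :=
  (pvGoA 8 (PySem.Dict.ofList assignment)).map PySem.Dict.items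

-- ===== PORT B =====
-- Explicit stack, head = top (Python's list with append/pop at the end); Source B pushes the
-- consistent extensions iterating reversed(values), i.e. a foldl over pvValues.reverse consing.
def pvGoB : Nat → List (PySem.Dict String String) → Option (PySem.Dict String String)
  | 0, _ => none        -- fuel guard only: the stack DFS pops at most 3280 nodes
  | _ + 1, [] => none
  | f + 1, a :: stack =>
    if PySem.Dict.size a = pvVars.length then some a
    else
      match pvSelect a with
      | none => pvGoB f stack   -- Python would assign to key None here; unreachable on Pre_ inputs
      | some v =>
        pvGoB f (pvValues.reverse.foldl
          (fun st val =>
            let na := a.insert v val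
            if pvConsistent na then na :: st else st) stack)

def backtrack_alt (assignment : List (String × String)) : Option (List (String × String)) :=
  (pvGoB 3280 [PySem.Dict.ofList assignment]).map PySem.Dict.items

-- ===== PRECONDITION & SPEC =====
-- Pre_ excludes inputs with more than 7 distinct keys: there a stray-key assignment can drive A
-- into unbounded recursion (select_unassigned_variable yields None, the dict's length never
-- reaches 7, and A hits RecursionError); the inputs of that shape on which A still returns None
-- are excluded with them, since separating the two would amount to simulating the search.
def Pre_backtrack (assignment : List (String × String)) : Prop :=
  (PySem.List.dedup (assignment.map Prod.fst)).length ≤ 7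

instance (assignment : List (String × String)) : Decidable (Pre_backtrack assignment) := by
  unfold Pre_backtrack; infer_instance

def pvWitness_backtrack : (List (String × String)) := [("A", "Monday"), ("E", "Tuesday")]

def Spec_backtrack (assignment : List (String × String)) (out : Option (List (String × String))) : Prop := out = backtrack_alt assignment
instance (assignment : List (String × String)) (out : Option (List (String × String))) : Decidable (Spec_backtrack assignment out) := by unfold Spec_backtrack; infer_instance

-- ===== CLAIM (what is proved, stated in full; the proofs are below) =====
def Claim_equal_backtrack : Prop := ∀ (assignment : List (String × String)), Dom_backtrack assignment → Pre_backtrack assignment → Spec_backtrack assignment (backtrack assignment)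

-- ===== LEMMAS AND PROOFS =====

-- number of still-unassigned variables: the decreasing measure of the search.
def pvMu (a : PySem.Dict String String) : Nat :=
  (pvVars.filter (fun v => !(a.contains v))).length

-- node-count bound for a search tree of height n (w n = 1 + 3 + … + 3^n).
def pvW : Nat → Nat
  | 0 => 1
  | n + 1 => 3 * pvW n + 1

def pvChildren (a : PySem.Dict String String) (v : String) : List (PySem.Dict String String) :=
  pvValues.filterMap (fun val =>
    if pvConsistent (a.insert v val) then some (a.insert v val) else none)

-- the first solution among the A-searches of the stack elements, in order.
def pvFirst : List (PySem.Dict String String) → Option (PySem.Dict String String)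
  | [] => none
  | a :: t =>
    match pvGoA 8 a with
    | some r => some r
    | none => pvFirst t

def pvWeight (s : List (PySem.Dict String String)) : Nat := (s.map (fun a => pvW (pvMu a))).sum

lemma pvW_pos (n : Nat) : 1 ≤ pvW n := by
  cases n with
  | zero => simp [pvW]
  | succ n => simp [pvW]

lemma pvW_mono : ∀ {m n : Nat}, m ≤ n → pvW m ≤ pvW n := by
  intro m n h
  induction n with
  | zero => interval_cases m; rfl
  | succ n ih =>
    rcases Nat.lt_or_ge m (n + 1) with h' | h'
    · exact le_trans (ih (by omega)) (by simp [pvW]; omega)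
    · have : m = n + 1 := by omega
      simp [this]

lemma pvSelectGo_spec : ∀ (l : List String) (a : PySem.Dict String String) (v : String),
    pvSelectGo a l = some v → v ∈ l ∧ a.contains v = false := by
  intro l a v h
  induction l with
  | nil => simp [pvSelectGo] at h
  | cons x rest ih =>
    by_cases hc : a.contains x
    · simp [pvSelectGo, hc] at h
      rcases ih h with ⟨h1, h2⟩
      exact ⟨List.mem_cons_of_mem _ h1, h2⟩
    · simp [pvSelectGo, hc] at h
      subst h
      exact ⟨List.mem_cons_self, by simpa using hc⟩

lemma pvFilter_insert_lt : ∀ (l : List String) (a : PySem.Dict String String) (v val : String),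
    v ∈ l → a.contains v = false →
    (l.filter (fun x => !((a.insert v val).contains x))).length <
      (l.filter (fun x => !(a.contains x))).length := by
  intro l a v val hmem hnc
  induction l with
  | nil => simp at hmem
  | cons x rest ih =>
    by_cases hx : x = v
    · subst hx
      have h1 : (a.insert x val).contains x = true := PySem.Dict.contains_insert_self a x val
      have hle : (rest.filter (fun y => !((a.insert x val).contains y))).length ≤
          (rest.filter (fun y => !(a.contains y))).length := by
        rw [← List.countP_eq_length_filter, ← List.countP_eq_length_filter]
        apply List.countP_mono_left
        intro y _ hy
        simp only [PySem.Dict.contains_insert] at hy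
        simp_all
      simp [h1, hnc]
      omega
    · have hx' : (a.insert v val).contains x = a.contains x := by
        rw [PySem.Dict.contains_insert]
        simp [show (x == v) = false from by simp [hx]]
      have hmem' : v ∈ rest := by
        rcases List.mem_cons.mp hmem with h | h
        · exact absurd h.symm hx
        · exact h
      have := ih hmem'
      simp only [List.filter_cons, hx']
      split <;> simp <;> omega

lemma pvMu_insert_lt (a : PySem.Dict String String) (v val : String)
    (hmem : v ∈ pvVars) (hnc : a.contains v = false) :
    pvMu (a.insert v val) < pvMu a :=
  pvFilter_insert_lt pvVars a v val hmem hnc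

lemma pvMu_le (a : PySem.Dict String String) : pvMu a ≤ 7 := by
  have := List.length_filter_le (fun v => !(a.contains v)) pvVars
  simpa [pvMu, pvVars] using this

lemma pvTryA_congr : ∀ (L : List String)
    (r1 r2 : PySem.Dict String String → Option (PySem.Dict String String))
    (a : PySem.Dict String String) (v : String),
    (∀ val ∈ L, r1 (a.insert v val) = r2 (a.insert v val)) →
    pvTryA r1 a v L = pvTryA r2 a v L := by
  intro L r1 r2 a v h
  induction L with
  | nil => rfl
  | cons val rest ih =>
    simp only [pvTryA]
    rw [h val List.mem_cons_self]
    have ih' := ih (fun x hx => h x (List.mem_cons_of_mem _ hx))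
    split
    · cases r2 (a.insert v val) <;> simp [ih']
    · exact ih'

lemma pvGoA_fuel : ∀ (f g : Nat) (a : PySem.Dict String String),
    pvMu a < f → pvMu a < g → pvGoA f a = pvGoA g a := by
  intro f
  induction f with
  | zero => intro g a h; omega
  | succ f ih =>
    intro g a hf hg
    cases g with
    | zero => omega
    | succ g =>
      simp only [pvGoA]
      split
      · rfl
      · cases hsel : pvSelect a with
        | none => rfl
        | some v =>
          obtain ⟨hvmem, hvnc⟩ := pvSelectGo_spec pvVars a v hsel
          apply pvTryA_congr
          intro val _
          have hlt := pvMu_insert_lt a v val hvmem hvnc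
          exact ih g (a.insert v val) (by omega) (by omega)

lemma pvPush_eq : ∀ (L : List String) (a : PySem.Dict String String) (v : String)
    (t : List (PySem.Dict String String)),
    L.reverse.foldl (fun st val =>
        if pvConsistent (a.insert v val) then (a.insert v val) :: st else st) t
      = (L.filterMap (fun val =>
          if pvConsistent (a.insert v val) then some (a.insert v val) else none)) ++ t := by
  intro L a v t
  induction L with
  | nil => rfl
  | cons x rest ih =>
    rw [List.reverse_cons, List.foldl_append, ih]
    simp only [List.foldl_cons, List.foldl_nil, List.filterMap_cons]
    split <;> simp_all

lemma pvTryA_first : ∀ (L : List String) (a : PySem.Dict String String) (v : String),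
    (∀ val, pvGoA 7 (a.insert v val) = pvGoA 8 (a.insert v val)) →
    pvTryA (pvGoA 7) a v L =
      pvFirst (L.filterMap (fun val =>
        if pvConsistent (a.insert v val) then some (a.insert v val) else none)) := by
  intro L a v h
  induction L with
  | nil => rfl
  | cons val rest ih =>
    simp only [pvTryA, List.filterMap_cons]
    rw [h val]
    split
    · simp only [pvFirst]
      cases pvGoA 8 (a.insert v val) <;> simp [ih]
    · exact ih

lemma pvFirst_append : ∀ (x y : List (PySem.Dict String String)),
    pvFirst (x ++ y) = match pvFirst x with
      | some r => some r
      | none => pvFirst y := by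
  intro x y
  induction x with
  | nil => simp [pvFirst]
  | cons a t ih =>
    simp only [List.cons_append, pvFirst]
    cases pvGoA 8 a <;> simp [ih]

lemma pvWeight_children (a : PySem.Dict String String) (v : String)
    (hmem : v ∈ pvVars) (hnc : a.contains v = false) :
    pvWeight (pvChildren a v) + 1 ≤ pvW (pvMu a) := by
  have hmu1 : 1 ≤ pvMu a := by
    have hm : v ∈ pvVars.filter (fun x => !(a.contains x)) :=
      List.mem_filter.mpr ⟨hmem, by simp [hnc]⟩
    have := List.length_pos_of_mem hm
    unfold pvMu
    omega
  have hb : ∀ val, pvW (pvMu (a.insert v val)) ≤ pvW (pvMu a - 1) := fun val =>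
    pvW_mono (by have := pvMu_insert_lt a v val hmem hnc; omega)
  have hw : pvW (pvMu a) = 3 * pvW (pvMu a - 1) + 1 := by
    have h : pvMu a = (pvMu a - 1) + 1 := by omega
    rw [h]; rfl
  have h1 := hb "Monday"
  have h2 := hb "Tuesday"
  have h3 := hb "Wednesday"
  simp only [pvChildren, pvValues, List.filterMap]
  split_ifs <;> simp [pvWeight] <;> omega

lemma pvGoA8 (a : PySem.Dict String String) :
    pvGoA 8 a = (if PySem.Dict.size a = pvVars.length then some a
      else match pvSelect a with
        | none => none
        | some v => pvTryA (pvGoA 7) a v pvValues) := rfl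

lemma pvGoB_first : ∀ (f : Nat) (s : List (PySem.Dict String String)),
    pvWeight s ≤ f → pvGoB f s = pvFirst s := by
  intro f
  induction f using Nat.strong_induction_on with
  | _ f ih =>
    intro s hw
    match f, s with
    | f, [] => cases f <;> rfl
    | 0, a :: t =>
      exfalso
      have := pvW_pos (pvMu a)
      simp [pvWeight] at hw
      omega
    | f + 1, a :: t =>
      have hw' : pvW (pvMu a) + pvWeight t ≤ f + 1 := by
        simpa [pvWeight] using hw
      have hwp := pvW_pos (pvMu a)
      simp only [pvGoB, pvFirst, pvGoA8 a]
      by_cases hsz : PySem.Dict.size a = pvVars.length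
      · simp [hsz]
      · simp only [hsz, if_false]
        cases hsel : pvSelect a with
        | none => exact ih f (by omega) t (by omega)
        | some v =>
          obtain ⟨hvmem, hvnc⟩ := pvSelectGo_spec pvVars a v hsel
          have hpush := pvPush_eq pvValues a v t
          simp only [hpush]
          change pvGoB f (pvChildren a v ++ t) = _
          have hwc := pvWeight_children a v hvmem hvnc
          have hwapp : pvWeight (pvChildren a v ++ t) = pvWeight (pvChildren a v) + pvWeight t := by
            simp [pvWeight]
          rw [ih f (by omega) (pvChildren a v ++ t) (by omega), pvFirst_append]
          have htry : pvTryA (pvGoA 7) a v pvValues = pvFirst (pvChildren a v) := by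
            apply pvTryA_first
        -- fuel 7 and 8 agree below a, since pvMu drops under 7 there
            intro val
            have hlt := pvMu_insert_lt a v val hvmem hvnc
            have hle := pvMu_le a
            exact pvGoA_fuel 7 8 (a.insert v val) (by omega) (by omega)
          rw [htry]

lemma pvGoB_goA (d : PySem.Dict String String) : pvGoB 3280 [d] = pvGoA 8 d := by
  have hw : pvWeight [d] ≤ 3280 := by
    have h1 : pvW (pvMu d) ≤ pvW 7 := pvW_mono (pvMu_le d)
    have h2 : pvW 7 = 3280 := by rfl
    simp [pvWeight]
    omega
  rw [pvGoB_first 3280 [d] hw]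
  simp only [pvFirst]
  cases pvGoA 8 d <;> rfl

-- ===== VERDICT (by name: the statement is the Claim_ definition above) =====
theorem backtrack_spec : Claim_equal_backtrack := by
  intro assignment _ _
  unfold Spec_backtrack backtrack backtrack_alt
  rw [pvGoB_goA]
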